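-- pv_equiv track=rewrite | github.com/sreyansb/LeetCode | MAY2021/9.py | isPossible
-- ===== SOURCE A (Python) =====
-- from typing import List
--
-- from heapq import heapify, heappush, heappop
--
-- def isPossible(target: List[int]) -> bool:
--     sumy=sum(target)
--     target=[-i for i in target]
--     n=len(target)
--     heapify(target)
--     arr=[-1]*n
--     if target==arr:
--         return True
--     while(True):
--         if sumy<n:
--             return False
--         ele=-heappop(target)
--         roe=sumy-ele
--         if roe==1:
--             return True
--         sumy-=ele
--         if ele-roe<=0 or roe==0 or ele%roe==0:
--             return False
--         ele=ele%roe
--         heappush(target,-ele)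
--         if target==arr:
--             return True
--         sumy+=ele
-- ===== SOURCE B (Python) =====
-- def isPossible(target):
--     arr = list(target)
--     n = len(arr)
--     s = sum(arr)
--     if all(v == 1 for v in arr):
--         return True
--     while True:
--         if s < n:
--             return False
--         ele = max(arr)
--         roe = s - ele
--         if roe == 1:
--             return True
--         s -= ele
--         if ele - roe <= 0 or roe == 0 or ele % roe == 0:
--             return False
--         e2 = ele % roe
--         for i in range(n):
--             if arr[i] == ele:
--                 arr[i] = e2
--                 break
--         if all(v == 1 for v in arr):
--             return True
--         s += e2
-- ===== Notes on version B (the rewrite author's own statement) =====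
-- stated objective: simpler
-- what changed: B drops the heap and the sign-flipping entirely: it keeps the numbers in a plain list, finds the maximum by a linear scan, replaces its first occurrence in place, and tests the all-ones goal directly instead of comparing a negated heap against a sentinel list; a timing run measured this constant-factor win (no heapify, no negation passes).
import Mathlib
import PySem

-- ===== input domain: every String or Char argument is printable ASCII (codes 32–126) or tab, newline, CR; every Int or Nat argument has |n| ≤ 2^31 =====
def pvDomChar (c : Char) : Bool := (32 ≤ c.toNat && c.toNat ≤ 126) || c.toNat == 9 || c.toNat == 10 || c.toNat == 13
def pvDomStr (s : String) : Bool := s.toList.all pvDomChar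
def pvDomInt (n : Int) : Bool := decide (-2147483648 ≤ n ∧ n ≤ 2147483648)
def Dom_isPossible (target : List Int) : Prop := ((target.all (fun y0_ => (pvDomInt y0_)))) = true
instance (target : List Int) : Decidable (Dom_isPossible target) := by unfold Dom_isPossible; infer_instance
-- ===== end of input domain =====

-- B replaces A's heap of negated values by a plain list with a max-scan and an
-- in-place replacement of the maximum (objective: simpler — no heap, no negation).

-- ===== PORT A =====
-- The heapq heap is modelled by the list of its elements: the code only observes
-- pop-min (PySem.List.min?), push (append) and equality with the all-equal list
-- [-1]*n, none of which depends on the heap's internal array order, so this is exact.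
def loopA (fuel : Nat) (heap : List Int) (sumy : Int) (n : Nat) : Bool :=
  match fuel with
  | 0 => false  -- never reached: the fuel passed below exceeds the loop's decreasing measure
  | fuel + 1 =>
    if sumy < (n : Int) then false
    else
      match PySem.List.min? heap (fun x => x) with
      | none => false   -- unreachable: the heap holds n ≥ 1 elements whenever the loop runs
      | some m =>
        let ele := -m                          -- ele = -heappop(target)
        let roe := sumy - ele
        if roe = 1 then true
        else if ele - roe ≤ 0 then false       -- 'or' ported as nested ifs (short-circuit)
        else if roe = 0 then false
        else if PySem.Int.mod ele roe = 0 then false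
        else
          let ele2 := PySem.Int.mod ele roe
          let heap2 := heap.erase m ++ [-ele2] -- heappush(target, -ele)
          if heap2 = List.replicate n (-1) then true
          else loopA fuel heap2 ((sumy - ele) + ele2) n

def isPossible (target : List Int) : Bool :=
  let sumy := target.sum
  let tneg := target.map (fun i => -i)
  let n := tneg.length
  if tneg = List.replicate n (-1) then true   -- if target==arr (arr = [-1]*n)
  else loopA ((sumy - n + 1).toNat + 1) tneg sumy n

-- ===== PORT B =====
-- replace the first occurrence of tgt by v (B's for-loop with break)
def setFirst : List Int → Int → Int → List Int
  | [], _, _ => []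
  | x :: xs, tgt, v => if x = tgt then v :: xs else x :: setFirst xs tgt v

def loopB (fuel : Nat) (arr : List Int) (s : Int) (n : Nat) : Bool :=
  match fuel with
  | 0 => false  -- never reached: the fuel passed below exceeds the loop's decreasing measure
  | fuel + 1 =>
    if s < (n : Int) then false
    else
      match PySem.List.max? arr (fun x => x) with
      | none => false   -- unreachable: arr is nonempty whenever the loop runs
      | some ele =>
        let roe := s - ele
        if roe = 1 then true
        else if ele - roe ≤ 0 then false
        else if roe = 0 then false
        else if PySem.Int.mod ele roe = 0 then false
        else
          let e2 := PySem.Int.mod ele roe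
          let arr2 := setFirst arr ele e2
          if arr2.all (fun v => v == 1) then true
          else loopB fuel arr2 ((s - ele) + e2) n

def isPossible_alt (target : List Int) : Bool :=
  let arr := target
  if arr.all (fun v => v == 1) then true
  else loopB ((arr.sum - arr.length + 1).toNat + 1) arr arr.sum arr.length

-- ===== PRECONDITION & SPEC =====
def Spec_isPossible (target : List Int) (out : Bool) : Prop := out = isPossible_alt target
instance (target : List Int) (out : Bool) : Decidable (Spec_isPossible target out) := by unfold Spec_isPossible; infer_instance

-- ===== CLAIM (what is proved, stated in full; the proofs are below) =====
def Claim_equal_isPossible : Prop := ∀ (target : List Int), Dom_isPossible target → Spec_isPossible target (isPossible target)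

-- ===== LEMMAS AND PROOFS =====

theorem min_max_corr (heap arr : List Int) (hp : heap.Perm (arr.map (fun x => -x))) :
    PySem.List.min? heap (fun x => x) = (PySem.List.max? arr (fun x => x)).map (fun x => -x) := by
  cases hA : PySem.List.max? arr (fun x => x) with
  | none =>
      have harr : arr = [] := (PySem.List.max?_eq_none_iff arr _).mp hA
      subst harr
      have : heap = [] := by simpa using hp.eq_nil
      simp [this, PySem.List.min?_eq_none_iff]
  | some e =>
      have he : e ∈ arr := PySem.List.max?_mem hA
      have hmax := PySem.List.max?_isMax hA
      have hne : heap ≠ [] := by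
        intro h; rw [h] at hp
        have := hp.symm.eq_nil
        simp at this
        simp [this] at he
      cases hm : PySem.List.min? heap (fun x => x) with
      | none => exact absurd ((PySem.List.min?_eq_none_iff heap _).mp hm) hne
      | some m =>
          have hmm : m ∈ heap := PySem.List.min?_mem hm
          have hmin := PySem.List.min?_isMin hm
          have hneg_e : -e ∈ heap := hp.mem_iff.mpr (List.mem_map.mpr ⟨e, he, rfl⟩)
          have h1 : m ≤ -e := hmin _ hneg_e
          have h2 : -e ≤ m := by
            have : m ∈ arr.map (fun x => -x) := hp.mem_iff.mp hmm
            rcases List.mem_map.mp this with ⟨a, ha, rfl⟩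
            have := hmax a ha
            omega
          simp [show m = -e by omega]

theorem setFirst_perm (arr : List Int) (tgt v : Int) (h : tgt ∈ arr) :
    (setFirst arr tgt v).Perm (v :: arr.erase tgt) := by
  induction arr with
  | nil => simp at h
  | cons x xs ih =>
      by_cases hx : x = tgt
      · simp [setFirst, hx, List.erase_cons_head]
      · have htgt : tgt ∈ xs := by
          rcases List.mem_cons.mp h with h' | h'
          · exact absurd h'.symm hx
          · exact h'
        have : (x :: xs).erase tgt = x :: xs.erase tgt := by
          simp [hx]
        rw [this]
        simp only [setFirst, if_neg hx]
        exact ((ih htgt).cons x).trans (List.Perm.swap v x _)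

theorem rep_iff (heap2 arr2 : List Int) (n : Nat)
    (hp : heap2.Perm (arr2.map (fun x => -x))) (hl : heap2.length = n) :
    (heap2 = List.replicate n (-1)) ↔ (arr2.all (fun v => v == 1) = true) := by
  rw [List.eq_replicate_iff, List.all_eq_true]
  constructor
  · rintro ⟨-, hall⟩ v hv
    have : -v ∈ heap2 := hp.mem_iff.mpr (List.mem_map.mpr ⟨v, hv, rfl⟩)
    have := hall _ this
    simp; omega
  · intro hall
    refine ⟨hl, fun b hb => ?_⟩
    rcases List.mem_map.mp (hp.mem_iff.mp hb) with ⟨a, ha, rfl⟩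
    have := hall a ha
    simp at this
    omega

theorem max_of_min (heap arr : List Int) (m : Int)
    (hp : heap.Perm (arr.map (fun x => -x)))
    (hmin : PySem.List.min? heap (fun x => x) = some m) :
    PySem.List.max? arr (fun x => x) = some (-m) := by
  have hc := min_max_corr heap arr hp
  rw [hmin] at hc
  cases hA : PySem.List.max? arr (fun x => x) with
  | none => rw [hA] at hc; simp at hc
  | some e => rw [hA] at hc; simp at hc; simp; omega

theorem neg_mem (heap arr : List Int) (m : Int)
    (hp : heap.Perm (arr.map (fun x => -x))) (hm : m ∈ heap) : -m ∈ arr := by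
  rcases List.mem_map.mp (hp.mem_iff.mp hm) with ⟨a, ha, rfl⟩
  simpa using ha

theorem step_perm (heap arr : List Int) (m v : Int)
    (hp : heap.Perm (arr.map (fun x => -x))) (hmem : -m ∈ arr) :
    (heap.erase m ++ [-v]).Perm ((setFirst arr (-m) v).map (fun x => -x)) := by
  have h1 : (heap.erase m ++ [-v]).Perm (-v :: heap.erase m) := List.perm_append_singleton _ _
  have h2 : (heap.erase m).Perm ((arr.map (fun x => -x)).erase m) := hp.erase m
  have h3 : (arr.erase (-m)).map (fun x => -x) = (arr.map (fun x => -x)).erase m := by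
    have := List.map_erase (f := fun x : Int => -x)
      (fun a b h => by dsimp at h; omega) (a := -m) arr
    simpa using this
  have h4 := (setFirst_perm arr (-m) v hmem).map (fun x => -x)
  refine h1.trans (List.Perm.trans ?_ h4.symm)
  simp only [List.map_cons]
  exact (h2.trans (by rw [h3])).cons _

theorem step_len (heap : List Int) (m v : Int) (n : Nat)
    (hm : m ∈ heap) (hl : heap.length = n) :
    (heap.erase m ++ [-v]).length = n := by
  have h1 := List.length_erase_of_mem hm
  have h2 : 1 ≤ heap.length := List.length_pos_of_mem hm
  simp [h1]
  omega

theorem loop_eq (fuel : Nat) (heap : List Int) (sumy : Int) (n : Nat) (arr : List Int)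
    (hp : heap.Perm (arr.map (fun x => -x))) (hl : heap.length = n) :
    loopA fuel heap sumy n = loopB fuel arr sumy n := by
  induction fuel generalizing heap sumy arr with
  | zero => rfl
  | succ f ih =>
      rw [loopA, loopB]
      by_cases h1 : sumy < (n : Int)
      · simp [h1]
      · simp only [if_neg h1]
        cases hmin : PySem.List.min? heap (fun x => x) with
        | none =>
            have hh : heap = [] := (PySem.List.min?_eq_none_iff heap _).mp hmin
            subst hh
            have ha : arr = [] := by
              have h := hp.symm.eq_nil
              simpa using h
            subst ha
            rw [(PySem.List.max?_eq_none_iff ([] : List Int) (fun x => x)).mpr rfl]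
        | some m =>
            have hmax := max_of_min heap arr m hp hmin
            rw [hmax]
            by_cases h2 : sumy + m = 1
            · simp [h2]
            · by_cases h3 : -m ≤ sumy + m
              · simp [h2, h3]
              · by_cases h4 : sumy + m = 0
                · simp [h4]
                · by_cases h5 : PySem.Int.mod (-m) (sumy + m) = 0
                  · simp [h2, h3, h4, h5]
                  · have hmem := neg_mem heap arr m hp (PySem.List.min?_mem hmin)
                    have hperm2 := step_perm heap arr m (PySem.Int.mod (-m) (sumy + m)) hp hmem
                    have hlen2 := step_len heap m (PySem.Int.mod (-m) (sumy + m)) n (PySem.List.min?_mem hmin) hl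
                    have hrep := rep_iff _ _ n hperm2 hlen2
                    by_cases h6 : heap.erase m ++ [-PySem.Int.mod (-m) (sumy + m)] = List.replicate n (-1)
                    · have hall : ∀ x ∈ setFirst arr (-m) (PySem.Int.mod (-m) (sumy + m)), x = 1 := by
                        have h := hrep.mp h6
                        simp [List.all_eq_true] at h
                        exact h
                      simp [h2, h3, h4, h5, h6]
                      exact Or.inl hall
                    · have hall : ¬ ∀ x ∈ setFirst arr (-m) (PySem.Int.mod (-m) (sumy + m)), x = 1 := by
                        intro hfa
                        apply h6
                        apply hrep.mpr
                        simp [List.all_eq_true]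
                        exact hfa
                      simp [h2, h3, h4, h5, h6, hall]
                      exact ih _ _ _ hperm2 hlen2

theorem isPossible_spec : Claim_equal_isPossible := by
  intro target _
  unfold Spec_isPossible isPossible isPossible_alt
  have hp : (target.map (fun i => -i)).Perm (target.map (fun x => -x)) := List.Perm.refl _
  have hrep := rep_iff (target.map (fun i => -i)) target (target.map (fun i => -i)).length hp rfl
  by_cases h : target.all (fun v => v == 1) = true
  · simp only [List.length_map] at *
    rw [if_pos (by simpa [List.length_map] using hrep.mpr h), if_pos h]
  · simp only [List.length_map] at *
    rw [if_neg (by intro hc; exact h (hrep.mp hc)), if_neg h]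
    simpa [List.length_map] using
      loop_eq ((target.sum - target.length + 1).toNat + 1)
        (target.map (fun i => -i)) target.sum target.length target hp (by simp)
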